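-- pv_equiv track=rewrite | github.com/ichen-lab-ucsb/WFLIVM_k-Seq | graphics/PieNetworks.py | FindMuts
-- ===== SOURCE A (Python) =====
-- def FindMuts(start,end):
--     zipped = list(zip(start,end))
--     MutList = []
--     pos=0
--     MutPos=[]
--     for i,j in zipped:
--         if i!=j:
--             MutPos.append(pos)
--         pos+=1
--     pos=0
--     for m in range(len(MutPos)):
--         mutant = list(start)
--         mutant[MutPos[pos]] = zipped[MutPos[pos]][1]
--         mutant = ''.join(mutant)
--         MutList.append(mutant)
--         pos+=1
--     return(MutList)
-- ===== SOURCE B (Python) =====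
-- def FindMuts(start, end):
--     return [start[:pos] + end[pos] + start[pos + 1:]
--             for pos, (i, j) in enumerate(zip(start, end))
--             if i != j]
-- ===== Notes on version B (the rewrite author's own statement) =====
-- stated objective: simpler
-- what changed: Replaces A's two-pass scheme (collect differing positions, then rebuild each mutant via list-copy/assign/join) with a single list comprehension that builds each mutant directly by string slicing.
import Mathlib
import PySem

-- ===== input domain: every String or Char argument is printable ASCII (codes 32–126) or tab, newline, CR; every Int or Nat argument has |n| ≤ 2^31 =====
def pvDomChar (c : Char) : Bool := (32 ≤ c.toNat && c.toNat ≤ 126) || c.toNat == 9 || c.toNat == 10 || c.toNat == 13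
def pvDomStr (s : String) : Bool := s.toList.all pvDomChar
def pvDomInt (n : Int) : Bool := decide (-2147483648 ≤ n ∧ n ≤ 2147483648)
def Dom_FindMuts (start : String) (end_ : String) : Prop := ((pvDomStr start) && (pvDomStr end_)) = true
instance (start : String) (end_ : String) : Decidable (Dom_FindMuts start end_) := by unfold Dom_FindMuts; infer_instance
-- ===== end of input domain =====

-- B replaces A's two-pass scheme (collect mutation positions, then rebuild each mutant by
-- list-copy/assign/join) with a single comprehension building each mutant by slicing (simpler).


-- ===== PORT A =====
-- first loop: walk zipped with a position counter, collecting positions where the chars differ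
def pvMutPosLoop (zipped : List (Char × Char)) (st : Nat × List Nat) : Nat × List Nat :=
  zipped.foldl (fun st ij => (st.1 + 1, if ij.1 ≠ ij.2 then st.2 ++ [st.1] else st.2)) st

def FindMuts (start : String) (end_ : String) : List String :=
  let zipped := start.toList.zip end_.toList
  let mutPos := (pvMutPosLoop zipped (0, [])).2
  -- second loop: for each recorded position, copy start, overwrite that index, join
  mutPos.foldl
    (fun acc p =>
      acc ++ [String.mk ((start.toList).set p (zipped.getD p (' ', ' ')).2)]) []

-- ===== PORT B =====
-- list comprehension over enumerate(zip(start,end)): slice-built mutant at each differing position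
def pvAltGo (s : List Char) (zipped : List (Char × Char)) (pos : Nat) : List String :=
  match zipped with
  | [] => []
  | (i, j) :: t =>
      (if i ≠ j then [String.mk (s.take pos ++ [j] ++ s.drop (pos + 1))] else [])
        ++ pvAltGo s t (pos + 1)

def FindMuts_alt (start : String) (end_ : String) : List String :=
  pvAltGo start.toList (start.toList.zip end_.toList) 0

-- ===== PRECONDITION & SPEC =====
def Spec_FindMuts (start : String) (end_ : String) (out : List String) : Prop := out = FindMuts_alt start end_
instance (start : String) (end_ : String) (out : List String) : Decidable (Spec_FindMuts start end_ out) := by unfold Spec_FindMuts; infer_instance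

-- ===== CLAIM (what is proved, stated in full; the proofs are below) =====
def Claim_equal_FindMuts : Prop := ∀ (start : String) (end_ : String), Dom_FindMuts start end_ → Spec_FindMuts start end_ (FindMuts start end_)

-- ===== LEMMAS AND PROOFS =====

-- the differing positions of a zipped tail starting at index k
def pvDiffPos (zipped : List (Char × Char)) (k : Nat) : List Nat :=
  match zipped with
  | [] => []
  | (i, j) :: t => (if i ≠ j then [k] else []) ++ pvDiffPos t (k + 1)

theorem pvMutPosLoop_eq (zipped : List (Char × Char)) :
    ∀ (k : Nat) (acc : List Nat),
      pvMutPosLoop zipped (k, acc) = (k + zipped.length, acc ++ pvDiffPos zipped k) := by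
  induction zipped with
  | nil => intro k acc; simp [pvMutPosLoop, pvDiffPos]
  | cons ij t ih =>
      intro k acc
      obtain ⟨i, j⟩ := ij
      rw [pvMutPosLoop, List.foldl_cons]
      by_cases h : i = j
      · rw [show ((k, acc).1 + 1,
              if (i, j).1 ≠ (i, j).2 then (k, acc).2 ++ [(k, acc).1] else (k, acc).2)
              = ((k + 1 : Nat), acc) from by simp [h]]
        rw [show List.foldl (fun (st : Nat × List Nat) (ij : Char × Char) =>
              (st.1 + 1, if ij.1 ≠ ij.2 then st.2 ++ [st.1] else st.2)) (k + 1, acc) t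
              = pvMutPosLoop t (k + 1, acc) from rfl, ih]
        simp [pvDiffPos, h, Nat.add_comm, Nat.add_left_comm]
      · rw [show ((k, acc).1 + 1,
              if (i, j).1 ≠ (i, j).2 then (k, acc).2 ++ [(k, acc).1] else (k, acc).2)
              = ((k + 1 : Nat), acc ++ [k]) from by simp [h]]
        rw [show List.foldl (fun (st : Nat × List Nat) (ij : Char × Char) =>
              (st.1 + 1, if ij.1 ≠ ij.2 then st.2 ++ [st.1] else st.2)) (k + 1, acc ++ [k]) t
              = pvMutPosLoop t (k + 1, acc ++ [k]) from rfl, ih]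
        simp [pvDiffPos, h, Nat.add_comm, Nat.add_left_comm]

-- B's worker, expressed as a map over the differing positions
theorem pvAltGo_eq_map (z : List (Char × Char)) (s : List Char) :
    ∀ (zf : List (Char × Char)) (k : Nat), zf = z.drop k →
      pvAltGo s zf k
        = (pvDiffPos zf k).map
            (fun p => String.mk (s.take p ++ [(z.getD p (' ', ' ')).2] ++ s.drop (p + 1))) := by
  intro zf
  induction zf with
  | nil => intro k _; simp [pvAltGo, pvDiffPos]
  | cons ij t ih =>
      intro k hk
      obtain ⟨i, j⟩ := ij
      have ht : t = z.drop (k + 1) := by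
        have := congrArg List.tail hk
        simpa [List.tail_drop] using this
      have h0 : z[k]? = some (i, j) := by
        have : (z.drop k)[0]? = some (i, j) := by rw [← hk]; rfl
        simpa [List.getElem?_drop] using this
      by_cases h : i = j
      · simp [pvAltGo, pvDiffPos, h, ih (k + 1) ht]
      · simp [pvAltGo, pvDiffPos, h, ih (k + 1) ht, List.getD, h0]

-- inside the real range, set = take ++ new char ++ drop; out of range both are identity-like
theorem pvSet_eq_slice (s : List Char) (p : Nat) (c : Char) (hp : p < s.length) :
    s.set p c = s.take p ++ [c] ++ s.drop (p + 1) := by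
  simp [List.set_eq_take_append_cons_drop, hp]

-- every differing position of (s.zip e).drop k at offset k is < s.length
theorem pvDiffPos_lt (s : List Char) (e : List Char) :
    ∀ (zf : List (Char × Char)) (k : Nat), zf = (s.zip e).drop k →
      ∀ p ∈ pvDiffPos zf k, p < s.length := by
  intro zf
  induction zf with
  | nil => intro k _ p hp; simp [pvDiffPos] at hp
  | cons ij t ih =>
      intro k hk p hp
      obtain ⟨i, j⟩ := ij
      have ht : t = (s.zip e).drop (k + 1) := by
        have := congrArg List.tail hk
        simpa [List.tail_drop] using this
      have hklt : k < s.length := by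
        have hlen : 0 < ((s.zip e).drop k).length := by rw [← hk]; simp
        have : k < (s.zip e).length := by
          simp only [List.length_drop] at hlen; omega
        simp only [List.length_zip] at this; omega
      simp only [pvDiffPos] at hp
      rcases List.mem_append.mp hp with h1 | h2
      · by_cases h : i = j
        · simp [h] at h1
        · simp [h] at h1; omega
      · exact ih (k + 1) ht p h2

-- ===== VERDICT (by name: the statement is the Claim_ definition above) =====
theorem FindMuts_spec : Claim_equal_FindMuts := by
  intro start end_ _
  unfold Spec_FindMuts FindMuts FindMuts_alt
  simp only []
  set s := start.toList with hs
  set z := s.zip end_.toList with hzdef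
  have hz0 : z = z.drop 0 := by simp
  rw [pvMutPosLoop_eq z 0 [], PySem.List.foldl_append_singleton_eq_map,
      pvAltGo_eq_map z s z 0 hz0]
  simp only [List.nil_append]
  apply List.map_congr_left
  intro p hp
  have hlt : p < s.length := pvDiffPos_lt s end_.toList z 0 hz0 p hp
  rw [pvSet_eq_slice s p _ hlt]
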